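-- pv_equiv track=rewrite | github.com/matt-j-harvey/Behaviour_Analysis | Create_Behaviour_Matrix_Discrimination.py | get_trial_end
-- ===== SOURCE A (Python) =====
-- def get_trial_end(onset, onsets_dictionary, traces_dictionary):
--
--     # If Not End - AI May Have Stopped Prematurely - Trial End Will Be Last Part of AI Recorder
--     ends_trace = traces_dictionary['end_trace']
--
--     trial_ends = onsets_dictionary["trial_ends"]
--     trial_ends.sort()
--
--     for end in trial_ends:
--         if end > onset:
--             return end
--     return len(ends_trace)
-- ===== SOURCE B (Python) =====
-- def get_trial_end(onset, onsets_dictionary, traces_dictionary):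
--     # Same observable mutation as A: trial_ends is sorted in place.
--     ends_trace = traces_dictionary['end_trace']
--     trial_ends = onsets_dictionary["trial_ends"]
--     trial_ends.sort()
--     # Binary search for the first element strictly greater than onset.
--     lo, hi = 0, len(trial_ends)
--     while lo < hi:
--         mid = (lo + hi) // 2
--         if trial_ends[mid] <= onset:
--             lo = mid + 1
--         else:
--             hi = mid
--     if lo < len(trial_ends):
--         return trial_ends[lo]
--     return len(ends_trace)
-- ===== Notes on version B (the rewrite author's own statement) =====
-- stated objective: alternative
-- what changed: The linear scan for the first trial end greater than onset is replaced by a hand-written binary search (bisect_right style) over the sorted list; the in-place sort and the found/default branching are kept.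
import Mathlib
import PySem

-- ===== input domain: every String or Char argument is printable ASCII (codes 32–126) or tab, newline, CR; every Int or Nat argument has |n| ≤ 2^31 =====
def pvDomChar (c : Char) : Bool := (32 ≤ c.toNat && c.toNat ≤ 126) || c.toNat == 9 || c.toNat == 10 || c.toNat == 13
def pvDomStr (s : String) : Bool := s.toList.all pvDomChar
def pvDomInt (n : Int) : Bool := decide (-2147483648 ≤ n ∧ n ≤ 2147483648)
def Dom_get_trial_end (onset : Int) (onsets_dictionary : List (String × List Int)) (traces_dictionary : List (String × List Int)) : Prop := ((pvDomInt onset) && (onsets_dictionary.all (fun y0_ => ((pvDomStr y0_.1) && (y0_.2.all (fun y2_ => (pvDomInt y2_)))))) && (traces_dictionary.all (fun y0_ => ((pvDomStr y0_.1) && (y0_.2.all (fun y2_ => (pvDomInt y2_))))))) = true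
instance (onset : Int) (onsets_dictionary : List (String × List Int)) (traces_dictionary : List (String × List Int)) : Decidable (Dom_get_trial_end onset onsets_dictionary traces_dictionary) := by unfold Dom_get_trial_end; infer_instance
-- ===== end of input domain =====

-- B replaces A's linear scan for the first trial end > onset by a hand-written binary search on the
-- sorted list (alternative decomposition; both sort trial_ends in place, so side effects coincide).


-- ===== PORT A =====
-- the `for end in trial_ends: if end > onset: return end` loop
def pyFindEnd (onset : Int) : List Int → Option Int
  | [] => none
  | e :: rest => if e > onset then some e else pyFindEnd onset rest

def get_trial_end (onset : Int) (onsets_dictionary : List (String × List Int)) (traces_dictionary : List (String × List Int)) : Int :=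
  match PySem.Dict.get? (PySem.Dict.mk traces_dictionary) "end_trace", PySem.Dict.get? (PySem.Dict.mk onsets_dictionary) "trial_ends" with
  | some ends_trace, some te =>
      let trial_ends := PySem.List.sorted te (fun x => x)
      match pyFindEnd onset trial_ends with
      | some e => e
      | none => (ends_trace.length : Int)
  | _, _ => 0  -- KeyError in Python; excluded by Pre_

-- ===== PORT B =====
-- the `while lo < hi` binary-search loop of Source B, step for step
-- fuel = hi - lo bounds the iteration count; each step shrinks hi - lo, so fuel never runs out
def bsLoop (xs : List Int) (onset : Int) : Nat → Nat → Nat → Nat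
  | 0, lo, _ => lo
  | fuel + 1, lo, hi =>
    if lo < hi then
      let mid := (lo + hi) / 2
      if xs.getD mid 0 ≤ onset then bsLoop xs onset fuel (mid + 1) hi
      else bsLoop xs onset fuel lo mid
    else lo

def get_trial_end_alt (onset : Int) (onsets_dictionary : List (String × List Int)) (traces_dictionary : List (String × List Int)) : Int :=
  match PySem.Dict.get? (PySem.Dict.mk traces_dictionary) "end_trace" with
  | none => 0  -- KeyError in Python; excluded by Pre_
  | some ends_trace =>
    match PySem.Dict.get? (PySem.Dict.mk onsets_dictionary) "trial_ends" with
    | none => 0  -- KeyError in Python; excluded by Pre_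
    | some te =>
      let s := PySem.List.sorted te (fun x => x)
      let i := bsLoop s onset s.length 0 s.length
      if i < s.length then s.getD i 0 else (ends_trace.length : Int)

-- ===== PRECONDITION & SPEC =====
-- Pre_ excludes exactly the inputs where Python A raises KeyError: a missing 'end_trace' or 'trial_ends' key.
def Pre_get_trial_end (onset : Int) (onsets_dictionary : List (String × List Int)) (traces_dictionary : List (String × List Int)) : Prop :=
  PySem.Dict.contains (PySem.Dict.mk traces_dictionary) "end_trace" = true ∧
  PySem.Dict.contains (PySem.Dict.mk onsets_dictionary) "trial_ends" = true
instance (onset : Int) (onsets_dictionary : List (String × List Int)) (traces_dictionary : List (String × List Int)) : Decidable (Pre_get_trial_end onset onsets_dictionary traces_dictionary) := by unfold Pre_get_trial_end; infer_instance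

def pvWitness_get_trial_end : Int × (List (String × List Int)) × (List (String × List Int)) :=
  (4, [("trial_ends", [7, 2, 9])], [("end_trace", [0, 1, 0, 1, 0])])

def Spec_get_trial_end (onset : Int) (onsets_dictionary : List (String × List Int)) (traces_dictionary : List (String × List Int)) (out : Int) : Prop := out = get_trial_end_alt onset onsets_dictionary traces_dictionary
instance (onset : Int) (onsets_dictionary : List (String × List Int)) (traces_dictionary : List (String × List Int)) (out : Int) : Decidable (Spec_get_trial_end onset onsets_dictionary traces_dictionary out) := by unfold Spec_get_trial_end; infer_instance

-- ===== CLAIM (what is proved, stated in full; the proofs are below) =====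
def Claim_equal_get_trial_end : Prop := ∀ (onset : Int) (onsets_dictionary : List (String × List Int)) (traces_dictionary : List (String × List Int)), Dom_get_trial_end onset onsets_dictionary traces_dictionary → Pre_get_trial_end onset onsets_dictionary traces_dictionary → Spec_get_trial_end onset onsets_dictionary traces_dictionary (get_trial_end onset onsets_dictionary traces_dictionary)

-- ===== LEMMAS AND PROOFS =====
lemma pw_le (s : List Int) (hs : s.Pairwise (· ≤ ·)) (i j : Nat) (hij : i ≤ j) (hj : j < s.length) :
    s.getD i 0 ≤ s.getD j 0 := by
  rcases Nat.lt_or_ge i j with h | h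
  · have hi : i < s.length := lt_trans h hj
    rw [List.getD_eq_getElem s 0 hi, List.getD_eq_getElem s 0 hj]
    exact List.pairwise_iff_getElem.mp hs i j hi hj h
  · have : i = j := le_antisymm hij h
    simp [this]

lemma bsLoop_spec (s : List Int) (onset : Int) (hs : s.Pairwise (· ≤ ·)) :
    ∀ (n lo hi : Nat), hi - lo ≤ n → lo ≤ hi → hi ≤ s.length →
    (∀ j, j < lo → s.getD j 0 ≤ onset) →
    (∀ j, hi ≤ j → j < s.length → onset < s.getD j 0) →
    (∀ j, j < bsLoop s onset n lo hi → s.getD j 0 ≤ onset) ∧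
    (∀ j, bsLoop s onset n lo hi ≤ j → j < s.length → onset < s.getD j 0) ∧
    bsLoop s onset n lo hi ≤ s.length := by
  intro n
  induction n with
  | zero =>
    intro lo hi hn hlohi hhl hlow hhigh
    have heq : lo = hi := by omega
    subst heq
    simp only [bsLoop]
    exact ⟨hlow, hhigh, hhl⟩
  | succ n ih =>
    intro lo hi hn hlohi hhl hlow hhigh
    rw [bsLoop]
    by_cases h : lo < hi
    · rw [if_pos h]
      set mid := (lo + hi) / 2 with hmid
      have hmlt : mid < hi := by omega
      have hmge : lo ≤ mid := by omega
      have hmlen : mid < s.length := lt_of_lt_of_le hmlt hhl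
      by_cases hc : s.getD mid 0 ≤ onset
      · rw [if_pos hc]
        refine ih (mid + 1) hi (by omega) (by omega) hhl ?_ hhigh
        intro j hj
        exact le_trans (pw_le s hs j mid (by omega) hmlen) hc
      · rw [if_neg hc]
        refine ih lo mid (by omega) hmge (le_of_lt hmlen) hlow ?_
        intro j hj hjlen
        exact lt_of_lt_of_le (lt_of_not_ge hc) (pw_le s hs mid j hj hjlen)
    · rw [if_neg h]
      have heq : lo = hi := by omega
      subst heq
      exact ⟨hlow, hhigh, hhl⟩

lemma pyFindEnd_char (onset : Int) :
    ∀ (s : List Int) (r : Nat), r ≤ s.length →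
    (∀ j, j < r → s.getD j 0 ≤ onset) →
    (∀ j, r ≤ j → j < s.length → onset < s.getD j 0) →
    pyFindEnd onset s = if r < s.length then some (s.getD r 0) else none := by
  intro s
  induction s with
  | nil => intro r hr _ _; simp [pyFindEnd]
  | cons e rest ih =>
    intro r hr hlow hhigh
    cases r with
    | zero =>
      have he : onset < e := by simpa using hhigh 0 (Nat.zero_le _) (by simp)
      simp [pyFindEnd, he]
    | succ r' =>
      have he : e ≤ onset := by simpa using hlow 0 (Nat.succ_pos _)
      have hne : ¬ e > onset := not_lt.mpr he
      rw [pyFindEnd]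
      simp only [hne, if_false]
      have := ih r' (by simpa using hr)
        (fun j hj => by simpa using hlow (j + 1) (by omega))
        (fun j hj hjl => by simpa using hhigh (j + 1) (by omega) (by simpa using hjl))
      rw [this]
      by_cases hlt : r' < rest.length
      · simp [hlt, Nat.succ_lt_succ hlt]
      · simp [hlt]

lemma core (onset : Int) (s : List Int) (L : Int) (hs : s.Pairwise (· ≤ ·)) :
    (match pyFindEnd onset s with | some e => e | none => L) =
    (if bsLoop s onset s.length 0 s.length < s.length then s.getD (bsLoop s onset s.length 0 s.length) 0 else L) := by
  obtain ⟨h1, h2, h3⟩ := bsLoop_spec s onset hs s.length 0 s.length (by omega) (Nat.zero_le _)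
    (le_refl _) (fun j hj => absurd hj (Nat.not_lt_zero j)) (fun j hj hjl => absurd hjl (not_lt.mpr hj))
  rw [pyFindEnd_char onset s (bsLoop s onset s.length 0 s.length) h3 h1 h2]
  by_cases h : bsLoop s onset s.length 0 s.length < s.length <;> simp [h]

-- ===== VERDICT (by name: the statement is the Claim_ definition above) =====
theorem get_trial_end_spec : Claim_equal_get_trial_end := by
  intro onset od td _ _
  unfold Spec_get_trial_end get_trial_end get_trial_end_alt
  cases het : PySem.Dict.get? (PySem.Dict.mk td) "end_trace" with
  | none => rfl
  | some ends_trace =>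
    cases hte : PySem.Dict.get? (PySem.Dict.mk od) "trial_ends" with
    | none => rfl
    | some te =>
      simp only
      have hs : (PySem.List.sorted te (fun x => x)).Pairwise (· ≤ ·) := by
        simpa using PySem.List.sorted_pairwise te (fun x => x)
      exact core onset _ _ hs
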